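-- pv_equiv track=rewrite | github.com/luke-mao/Data-Structures-and-Algorithms-in-Python | chapter5/q29.py | natural_join
-- ===== SOURCE A (Python) =====
-- def natural_join(data1, data2):
--     """data 1 and 2 in the format of tuples in list"""
--     Ymap = {}
--     for x, y in data1:
--         if y not in Ymap:
--             Ymap[y] = [x]
--         else:
--             Ymap[y].append(x)
--
--     result = []
--     for y, z in data2:
--         if y in Ymap:
--             for x in Ymap[y]:
--                 result.append((x, y, z))
--
--     return result
-- ===== SOURCE B (Python) =====
-- def natural_join(data1, data2):
--     """data 1 and 2 in the format of tuples in list"""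
--     result = []
--     for y, z in data2:
--         for x, yy in data1:
--             if yy == y:
--                 result.append((x, y, z))
--     return result
-- ===== Notes on version B (the rewrite author's own statement) =====
-- stated objective: simpler
-- what changed: Replaced the dict-based hash index (group data1 by key, then probe per data2 row) with a direct nested-loop join over data2 x data1, which keeps the exact output order and multiplicity with no auxiliary structure.
import Mathlib
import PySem

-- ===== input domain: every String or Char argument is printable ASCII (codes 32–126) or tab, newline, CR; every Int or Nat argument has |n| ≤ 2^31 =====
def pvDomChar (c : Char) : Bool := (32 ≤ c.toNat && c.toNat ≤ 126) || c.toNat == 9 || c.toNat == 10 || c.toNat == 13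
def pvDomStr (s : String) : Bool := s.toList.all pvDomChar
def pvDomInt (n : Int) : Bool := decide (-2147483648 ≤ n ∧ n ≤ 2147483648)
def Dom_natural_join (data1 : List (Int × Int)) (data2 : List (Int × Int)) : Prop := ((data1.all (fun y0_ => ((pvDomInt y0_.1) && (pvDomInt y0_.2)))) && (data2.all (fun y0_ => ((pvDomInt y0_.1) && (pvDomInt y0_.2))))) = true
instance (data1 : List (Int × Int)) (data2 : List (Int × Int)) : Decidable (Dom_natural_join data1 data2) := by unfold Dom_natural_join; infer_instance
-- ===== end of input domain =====

-- B replaces A's dict-based hash index with a direct nested-loop join over data2 × data1 (simpler, no auxiliary structure; same output order and multiplicity).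


-- ===== PORT A =====
-- 'if y not in Ymap: Ymap[y] = [x] else: Ymap[y].append(x)'
def pvBuildYmap (data1 : List (Int × Int)) : PySem.Dict Int (List Int) :=
  data1.foldl
    (fun d p =>
      if !d.contains p.2 then d.insert p.2 [p.1]
      else d.modify p.2 [] (fun l => l ++ [p.1]))
    PySem.Dict.empty

def natural_join (data1 : List (Int × Int)) (data2 : List (Int × Int)) : List (Int × Int × Int) :=
  let Ymap := pvBuildYmap data1
  data2.foldl
    (fun result p =>
      if Ymap.contains p.1 then
        result ++ (Ymap.getD p.1 []).map (fun x => (x, p.1, p.2))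
      else result)
    []

-- ===== PORT B =====
def natural_join_alt (data1 : List (Int × Int)) (data2 : List (Int × Int)) : List (Int × Int × Int) :=
  data2.foldl
    (fun result p =>
      data1.foldl
        (fun result2 q =>
          if q.2 == p.1 then result2 ++ [(q.1, p.1, p.2)] else result2)
        result)
    []

-- ===== PRECONDITION & SPEC =====
def Spec_natural_join (data1 : List (Int × Int)) (data2 : List (Int × Int)) (out : List (Int × Int × Int)) : Prop := out = natural_join_alt data1 data2
instance (data1 : List (Int × Int)) (data2 : List (Int × Int)) (out : List (Int × Int × Int)) : Decidable (Spec_natural_join data1 data2 out) := by unfold Spec_natural_join; infer_instance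

-- ===== CLAIM (what is proved, stated in full; the proofs are below) =====
def Claim_equal_natural_join : Prop := ∀ (data1 : List (Int × Int)) (data2 : List (Int × Int)), Dom_natural_join data1 data2 → Spec_natural_join data1 data2 (natural_join data1 data2)

-- ===== LEMMAS AND PROOFS =====

-- The grouping dict of A: lookup y gives the x's of data1 whose key is y, in order.
theorem pvBuildYmap_getD (data1 : List (Int × Int)) (y : Int) :
    (pvBuildYmap data1).getD y [] = ((data1.filter (fun q => q.2 == y)).map (fun q => q.1)) := by
  unfold pvBuildYmap
  suffices h : ∀ (l : List (Int × Int)) (d : PySem.Dict Int (List Int)),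
      (l.foldl (fun d p => if !d.contains p.2 then d.insert p.2 [p.1]
        else d.modify p.2 [] (fun l => l ++ [p.1])) d).getD y []
      = d.getD y [] ++ ((l.filter (fun q => q.2 == y)).map (fun q => q.1)) by
    simpa using h data1 PySem.Dict.empty
  intro l
  induction l with
  | nil => intro d; simp
  | cons p l ih =>
    intro d
    rw [List.foldl_cons, ih, List.filter_cons]
    by_cases hc : d.contains p.2
    · simp only [hc, Bool.not_true, Bool.false_eq_true, if_false]
      rw [PySem.Dict.getD_modify]
      by_cases hy : y = p.2
      · subst hy; simp
      · have hne : (p.2 == y) = false := by simp [Ne.symm hy]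
        simp [hy, hne]
    · have hc' : d.contains p.2 = false := by simpa using hc
      simp only [hc', Bool.not_false, if_true]
      rw [PySem.Dict.getD_insert]
      by_cases hy : y = p.2
      · subst hy
        rw [PySem.Dict.getD_of_not_contains _ _ hc']
        simp
      · have hne : (p.2 == y) = false := by simp [Ne.symm hy]
        simp [hy, hne]

-- B's inner loop over data1 appends exactly the matching joined rows.
theorem pvInnerB (y z : Int) (l : List (Int × Int)) (acc : List (Int × Int × Int)) :
    (l.foldl (fun result2 q => if q.2 == y then result2 ++ [(q.1, y, z)] else result2) acc)
      = acc ++ (l.filter (fun q => q.2 == y)).map (fun q => (q.1, y, z)) := by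
  induction l generalizing acc with
  | nil => simp
  | cons q l ih =>
    by_cases hq : q.2 == y
    · rw [List.foldl_cons, if_pos hq, ih, List.filter_cons, if_pos hq]
      simp
    · rw [List.foldl_cons, if_neg (by simp [hq]), ih, List.filter_cons, if_neg (by simp [hq])]

-- A's per-row step (probe the dict) equals B's per-row step (scan data1).
theorem pvStep_eq (data1 : List (Int × Int)) (p : Int × Int) (acc : List (Int × Int × Int)) :
    (if (pvBuildYmap data1).contains p.1 then
        acc ++ ((pvBuildYmap data1).getD p.1 []).map (fun x => (x, p.1, p.2))
      else acc)
    = data1.foldl (fun result2 q => if q.2 == p.1 then result2 ++ [(q.1, p.1, p.2)] else result2) acc := by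
  rw [pvInnerB, pvBuildYmap_getD, List.map_map]
  by_cases hc : (pvBuildYmap data1).contains p.1
  · simp [hc, Function.comp]
  · have hg : ((data1.filter (fun q => q.2 == p.1)).map (fun q => q.1)) = [] := by
      rw [← pvBuildYmap_getD]
      exact PySem.Dict.getD_of_not_contains _ _ (by simpa using hc)
    have hf : data1.filter (fun q => q.2 == p.1) = [] := by
      rcases List.map_eq_nil_iff.mp hg with h; exact h
    simp [hc, hf]

theorem pvJoin_eq (data1 data2 : List (Int × Int)) :
    natural_join data1 data2 = natural_join_alt data1 data2 := by
  unfold natural_join natural_join_alt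
  induction data2 using List.reverseRecOn with
  | nil => rfl
  | append_singleton l p ih =>
    simp only [List.foldl_append, List.foldl_cons, List.foldl_nil]
    rw [ih, pvStep_eq]

-- ===== VERDICT (by name: the statement is the Claim_ definition above) =====
theorem natural_join_spec : Claim_equal_natural_join :=
  fun data1 data2 _ => pvJoin_eq data1 data2
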